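-- pv_equiv track=rewrite | github.com/songcelia88/practice-problems | calculator/calculator.py | calc
-- ===== SOURCE A (Python) =====
-- def calc(s):
--     """Evaluate expression."""
--     s = s.split(" ")
--     operators = {"+", "-", "*", "/"}
--     ops_stack = []
--     num_stack = []
--
--     for char in s:
--         if char in operators:
--             ops_stack.append(char)
--         elif char.isdigit():
--             num_stack.append(int(char))
--
--     while ops_stack:
--         op = ops_stack.pop()
--         num1 = num_stack.pop()
--         num2 = num_stack.pop()
--
--         if op == "+":
--             num_stack.append(num1 + num2)
--         elif op == "-":
--             num_stack.append(num2 - num1)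
--         elif op == "*":
--             num_stack.append(num1 * num2)
--         elif op == "/":
--             num_stack.append(num2//num1) # floor division
--
--     return num_stack.pop()
-- ===== SOURCE B (Python) =====
-- def calc(s):
--     """Evaluate expression."""
--     toks = s.split(" ")
--     nums = [int(t) for t in toks if t.isdigit()]
--     ops = [t for t in toks if t in {"+", "-", "*", "/"}]
--     acc = nums[-1]
--     for op, n in zip(reversed(ops), reversed(nums[:-1])):
--         if op == "+":
--             acc = n + acc
--         elif op == "-":
--             acc = n - acc
--         elif op == "*":
--             acc = n * acc
--         else:
--             acc = n // acc
--     return acc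
-- ===== Notes on version B (the rewrite author's own statement) =====
-- stated objective: simpler
-- what changed: The single classifying loop with two stacks plus a second draining while-loop is replaced by two comprehensions and one fold over zip(reversed(ops), reversed(nums[:-1])) with a single scalar accumulator, eliminating the mutable number stack entirely.
import Mathlib
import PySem

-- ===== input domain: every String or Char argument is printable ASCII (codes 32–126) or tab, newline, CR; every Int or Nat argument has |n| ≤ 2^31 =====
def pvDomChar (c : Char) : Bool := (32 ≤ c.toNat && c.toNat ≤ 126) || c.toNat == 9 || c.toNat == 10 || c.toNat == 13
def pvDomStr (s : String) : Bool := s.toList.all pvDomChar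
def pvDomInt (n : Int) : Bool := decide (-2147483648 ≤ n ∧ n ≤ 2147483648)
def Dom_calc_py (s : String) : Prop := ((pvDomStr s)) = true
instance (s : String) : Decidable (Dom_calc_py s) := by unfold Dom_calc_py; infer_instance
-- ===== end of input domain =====

-- B replaces A's two-stack build-then-drain evaluation by two comprehensions and one
-- accumulator fold over zip(reversed(ops), reversed(nums[:-1])) — simpler, same O(n) cost.

-- ===== PORT A =====
-- the operator set {"+","-","*","/"} (Python's `operators`), shared constant
def pvIsOp (t : String) : Bool := t == "+" || t == "-" || t == "*" || t == "/"

-- int(char) for a token that passed isdigit (always parses there)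
def pvNum (t : String) : Int := (PySem.Int.ofStr? t).getD 0

-- the `while ops_stack:` draining loop; [] on Python's IndexError path (excluded by Pre_)
def pvDrainA (ops : List String) (nums : List Int) : List Int :=
  match h : PySem.List.pop? ops with
  | none => nums
  | some (op, ops') =>
    match PySem.List.pop? nums with
    | none => []
    | some (num1, ns1) =>
      match PySem.List.pop? ns1 with
      | none => []
      | some (num2, ns2) =>
        if op = "+" then pvDrainA ops' (ns2 ++ [num1 + num2])
        else if op = "-" then pvDrainA ops' (ns2 ++ [num2 - num1])
        else if op = "*" then pvDrainA ops' (ns2 ++ [num1 * num2])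
        else if op = "/" then pvDrainA ops' (ns2 ++ [PySem.Int.floordiv num2 num1])
        else pvDrainA ops' ns2
termination_by ops.length
decreasing_by all_goals (have := PySem.List.length_of_pop?_eq_some _ h; simp_all; omega)

def calc_py (s : String) : Int :=
  let toks := (PySem.Str.split? s " ").getD []
  let st := toks.foldl (fun (st : List String × List Int) ch =>
    if pvIsOp ch then (st.1 ++ [ch], st.2)
    else if PySem.Str.strIsdigit ch then (st.1, st.2 ++ [pvNum ch])
    else st) ([], [])
  match PySem.List.pop? (pvDrainA st.1 st.2) with
  | some (v, _) => v
  | none => 0  -- IndexError on empty stack; excluded by Pre_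

-- ===== PORT B =====
-- one fold step of B's accumulator loop
def pvStepB (acc : Int) (p : String × Int) : Int :=
  if p.1 = "+" then p.2 + acc
  else if p.1 = "-" then p.2 - acc
  else if p.1 = "*" then p.2 * acc
  else PySem.Int.floordiv p.2 acc

def calc_py_alt (s : String) : Int :=
  let toks := (PySem.Str.split? s " ").getD []
  let nums := (toks.filter (fun t => PySem.Str.strIsdigit t)).map pvNum
  let ops := toks.filter pvIsOp
  let acc0 := (PySem.List.pyGet? nums (-1)).getD 0  -- nums[-1]; default unreachable under Pre_
  (ops.reverse.zip (PySem.List.slice nums none (some (-1))).reverse).foldl pvStepB acc0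

-- ===== PRECONDITION & SPEC =====
-- safety of the right-to-left evaluation: every '/' meets a nonzero divisor
def pvDivSafe (acc : Int) : List (String × Int) → Bool
  | [] => true
  | (op, n) :: rest =>
    if op = "/" then acc ≠ 0 && pvDivSafe (PySem.Int.floordiv n acc) rest
    else pvDivSafe (if op = "+" then n + acc else if op = "-" then n - acc else n * acc) rest

-- Pre_ excludes exactly the inputs on which A raises: IndexError when there are fewer
-- number tokens than operator tokens + 1, and ZeroDivisionError when some '/' is applied
-- with a zero-valued right-hand accumulator; on every input where A returns, Pre_ holds.
def Pre_calc_py (s : String) : Prop :=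
  let toks := (PySem.Str.split? s " ").getD []
  let nums := (toks.filter (fun t => PySem.Str.strIsdigit t)).map pvNum
  let ops := toks.filter pvIsOp
  ops.length + 1 ≤ nums.length
  ∧ pvDivSafe ((PySem.List.pyGet? nums (-1)).getD 0) (ops.reverse.zip nums.dropLast.reverse) = true
instance (s : String) : Decidable (Pre_calc_py s) := by unfold Pre_calc_py; infer_instance

def pvWitness_calc_py : String := "8 / 2 + 1"

def Spec_calc_py (s : String) (out : Int) : Prop := out = calc_py_alt s
instance (s : String) (out : Int) : Decidable (Spec_calc_py s out) := by unfold Spec_calc_py; infer_instance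

-- ===== CLAIM (what is proved, stated in full; the proofs are below) =====
def Claim_equal_calc_py : Prop := ∀ (s : String), Dom_calc_py s → Pre_calc_py s → Spec_calc_py s (calc_py s)

-- ===== LEMMAS AND PROOFS =====

lemma pvDrainA_nil (nums : List Int) : pvDrainA [] nums = nums := by
  rw [pvDrainA]
  split
  · rfl
  · rename_i h; simp [PySem.List.pop?, PySem.List.pyIdx?] at h

lemma pvDrainA_snoc (init : List String) (op : String) (m : List Int) (n2 n1 : Int) :
    pvDrainA (init ++ [op]) (m ++ [n2] ++ [n1]) =
      if op = "+" then pvDrainA init (m ++ [n1 + n2])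
      else if op = "-" then pvDrainA init (m ++ [n2 - n1])
      else if op = "*" then pvDrainA init (m ++ [n1 * n2])
      else if op = "/" then pvDrainA init (m ++ [PySem.Int.floordiv n2 n1])
      else pvDrainA init m := by
  rw [pvDrainA]
  simp only [PySem.List.pop?_last]
  split
  · rename_i h; rw [PySem.List.pop?_last] at h; cases h
  · rename_i op1 ops' h
    rw [PySem.List.pop?_last] at h
    injection h with h'
    injection h' with h1 h2
    subst h1; subst h2
    rfl

-- A's classifying loop builds exactly (ops filtered, numbers filtered-and-parsed)
lemma pv_tokenize (toks : List String) (a : List String) (b : List Int) :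
    toks.foldl (fun (st : List String × List Int) ch =>
      if pvIsOp ch then (st.1 ++ [ch], st.2)
      else if PySem.Str.strIsdigit ch then (st.1, st.2 ++ [pvNum ch])
      else st) (a, b)
    = (a ++ toks.filter pvIsOp,
       b ++ (toks.filter (fun t => PySem.Str.strIsdigit t)).map pvNum) := by
  induction toks generalizing a b with
  | nil => simp
  | cons t ts ih =>
    by_cases hop : pvIsOp t
    · have hd : PySem.Chars.strIsdigit t.toList = false := by
        rcases (by simpa [pvIsOp, or_assoc] using hop : t = "+" ∨ t = "-" ∨ t = "*" ∨ t = "/") with h | h | h | h <;>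
          subst h <;> decide
      rw [List.foldl_cons, if_pos hop, ih, List.filter_cons, List.filter_cons]
      simp [hop, hd]
    · by_cases hdg : PySem.Str.strIsdigit t
      · have hdg' : PySem.Chars.strIsdigit t.toList = true := by simpa using hdg
        rw [List.foldl_cons, if_neg hop, if_pos hdg, ih, List.filter_cons, List.filter_cons]
        simp [hop, hdg']
      · have hdg' : PySem.Chars.strIsdigit t.toList = false := by simpa using hdg
        rw [List.foldl_cons, if_neg hop, if_neg hdg, ih, List.filter_cons, List.filter_cons]
        simp [hop, hdg']

-- the draining loop computes B's right-to-left accumulator fold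
lemma pv_drain (ops : List String) (nums : List Int)
    (hops : ∀ t ∈ ops, pvIsOp t)
    (hlen : ops.length + 1 ≤ nums.length) :
    ∃ rest, PySem.List.pop? (pvDrainA ops nums)
      = some ((ops.reverse.zip nums.dropLast.reverse).foldl pvStepB
                ((PySem.List.pyGet? nums (-1)).getD 0), rest) := by
  induction ops using List.reverseRecOn generalizing nums with
  | nil =>
    rcases nums.eq_nil_or_concat' with rfl | ⟨m, n1, rfl⟩
    · simp at hlen
    · exact ⟨m, by
        rw [pvDrainA_nil]
        simp [PySem.List.pop?_last, PySem.List.pyGet?_neg_one_append_singleton]⟩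
  | append_singleton init op ih =>
    rcases nums.eq_nil_or_concat' with rfl | ⟨ns1, n1, rfl⟩
    · simp at hlen
    rcases ns1.eq_nil_or_concat' with rfl | ⟨m, n2, rfl⟩
    · simp at hlen
    have hop : pvIsOp op := hops op (by simp)
    have hops' : ∀ t ∈ init, pvIsOp t := fun t ht => hops t (by simp [ht])
    have hlen' : ∀ x : Int, init.length + 1 ≤ (m ++ [x]).length := by
      intro x; simp at hlen ⊢; omega
    rcases (by simpa [pvIsOp, or_assoc] using hop : op = "+" ∨ op = "-" ∨ op = "*" ∨ op = "/") with h | h | h | h <;>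
      subst h
    · obtain ⟨rest, hr⟩ := ih (m ++ [n1 + n2]) hops' (hlen' _)
      refine ⟨rest, ?_⟩
      rw [pvDrainA_snoc, if_pos rfl, hr]
      simp [pvStepB, PySem.List.pyGet?_neg_one, Int.add_comm]
    · obtain ⟨rest, hr⟩ := ih (m ++ [n2 - n1]) hops' (hlen' _)
      refine ⟨rest, ?_⟩
      rw [pvDrainA_snoc, if_neg (by decide), if_pos rfl, hr]
      simp [pvStepB, PySem.List.pyGet?_neg_one]
    · obtain ⟨rest, hr⟩ := ih (m ++ [n1 * n2]) hops' (hlen' _)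
      refine ⟨rest, ?_⟩
      rw [pvDrainA_snoc, if_neg (by decide), if_neg (by decide), if_pos rfl, hr]
      simp [pvStepB, PySem.List.pyGet?_neg_one, Int.mul_comm]
    · obtain ⟨rest, hr⟩ := ih (m ++ [PySem.Int.floordiv n2 n1]) hops' (hlen' _)
      refine ⟨rest, ?_⟩
      rw [pvDrainA_snoc, if_neg (by decide), if_neg (by decide), if_neg (by decide), if_pos rfl, hr]
      simp [pvStepB, PySem.List.pyGet?_neg_one]

-- ===== VERDICT (by name: the statement is the Claim_ definition above) =====
theorem calc_py_spec : Claim_equal_calc_py := by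
  intro s _ hpre
  obtain ⟨hlen, _⟩ := hpre
  unfold Spec_calc_py calc_py calc_py_alt
  simp only
  rw [pv_tokenize]
  obtain ⟨rest, hr⟩ := pv_drain (((PySem.Str.split? s " ").getD []).filter pvIsOp)
    ((((PySem.Str.split? s " ").getD []).filter (fun t => PySem.Str.strIsdigit t)).map pvNum)
    (fun t ht => (List.mem_filter.mp ht).2)
    (by simpa using hlen)
  simp only [List.nil_append] at hr ⊢
  rw [hr]
  simp [PySem.List.slice_to_neg_one]
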